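-- pv_equiv track=rewrite | github.com/JohnBurden/UniformStateAbstractionFlagCollection | QLambdaAbstractGen/QLearningAbstractionGenAgent.py | doTiling
-- ===== SOURCE A (Python) =====
-- import copy
--
-- def doTiling(template, size):
-- 	templateX = len(template[0])
-- 	templateY = len(template)
-- 	newTiling = copy.deepcopy(template)
--
-- 	currentLabel = (1,1)
-- 	currentX = 0
-- 	currentY= 0
-- 	for y in range(0, templateY):
-- 		currentLabel = (1, currentLabel[1])
-- 		currentX=0
-- 		for x in range(0, templateX):
-- 			if not template[y][x] == "w":
-- 				newTiling[y][x] = str(currentLabel)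
-- 			else:
-- 				newTiling[y][x] = str(currentLabel)
--
-- 			if currentX < size[0]:
-- 					currentX +=1
-- 			else:
-- 				currentLabel = (currentLabel[0]+1, currentLabel[1])
-- 				currentX = 0
-- 		if currentY<size[1]:
-- 			currentY+=1
-- 		else:
-- 			currentLabel = (currentLabel[0],currentLabel[1]+1)
-- 			currentY=0
--
-- 	return newTiling
-- ===== SOURCE B (Python) =====
-- import copy
--
-- def doTiling(template, size):
--     tiling = copy.deepcopy(template)
--     for y in range(len(template)):
--         for x in range(len(template[0])):
--             tiling[y][x] = str((x // (size[0] + 1) + 1, y // (size[1] + 1) + 1))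
--     return tiling
-- ===== Notes on version B (the rewrite author's own statement) =====
-- stated objective: simpler
-- what changed: Keeps the deep copy and the two nested index loops but replaces A's incremental currentX/currentY/currentLabel accumulator with rollover by the closed-form label str((x//(size[0]+1)+1, y//(size[1]+1)+1)) per cell; Pre_ excludes empty templates and rows shorter than the first row (A raises IndexError there) and negative tile-size components, malformed input outside the natural domain, on which A's accidental period-1 rollover labelling is not worth reproducing.
-- outside the precondition, e.g. on doTiling([['w']], (-1, 0)): A returns [['(1, 1)']], B raises ZeroDivisionError
import Mathlib
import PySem

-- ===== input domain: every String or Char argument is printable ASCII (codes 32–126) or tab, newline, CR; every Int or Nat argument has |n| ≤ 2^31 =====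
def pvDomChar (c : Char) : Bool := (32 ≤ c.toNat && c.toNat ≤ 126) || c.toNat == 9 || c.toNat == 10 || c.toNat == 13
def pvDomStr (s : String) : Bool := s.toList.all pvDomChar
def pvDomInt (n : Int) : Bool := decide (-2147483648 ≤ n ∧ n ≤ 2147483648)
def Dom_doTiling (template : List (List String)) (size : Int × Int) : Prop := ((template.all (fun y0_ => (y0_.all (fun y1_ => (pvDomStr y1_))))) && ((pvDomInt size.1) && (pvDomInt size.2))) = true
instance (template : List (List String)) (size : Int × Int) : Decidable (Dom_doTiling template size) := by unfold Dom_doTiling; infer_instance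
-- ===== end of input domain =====

-- B replaces A's incremental label accumulator with rollover by the closed-form
-- integer-division label per cell (objective: simpler).

-- str((a, b)) — Python's tuple rendering; shared formatting helper of both ports.
def pvStrPair (p : Int × Int) : String :=
  "(" ++ PySem.Int.toStr p.1 ++ ", " ++ PySem.Int.toStr p.2 ++ ")"

-- ===== PORT A =====
-- inner loop body: state (newTiling, currentLabel, currentX); reads/writes are in
-- range under Pre_ (getD/set are exact there).  Both branches of A's dead `if` kept.
def doTilingInner (template : List (List String)) (size : Int × Int) (y : Nat)
    (st : List (List String) × (Int × Int) × Int) (x : Nat) :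
    List (List String) × (Int × Int) × Int :=
  let nt := st.1
  let lbl := st.2.1
  let cx := st.2.2
  let nt := if ¬((template.getD y []).getD x "" == "w")
            then nt.set y ((nt.getD y []).set x (pvStrPair lbl))
            else nt.set y ((nt.getD y []).set x (pvStrPair lbl))
  if cx < size.1 then (nt, lbl, cx + 1)
  else (nt, (lbl.1 + 1, lbl.2), (0 : Int))

-- outer loop body: state (newTiling, currentLabel, currentY)
def doTilingOuter (template : List (List String)) (size : Int × Int) (templateX : Nat)
    (st : List (List String) × (Int × Int) × Int) (y : Nat) :
    List (List String) × (Int × Int) × Int :=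
  let nt := st.1
  let lbl := st.2.1
  let cy := st.2.2
  let lbl := ((1 : Int), lbl.2)
  let inner := (List.range templateX).foldl (doTilingInner template size y) (nt, lbl, (0 : Int))
  let nt := inner.1
  let lbl := inner.2.1
  if cy < size.2 then (nt, lbl, cy + 1)
  else (nt, (lbl.1, lbl.2 + 1), (0 : Int))

-- for y in range(0, n) with nonnegative bounds = fold over List.range n
def doTiling (template : List (List String)) (size : Int × Int) : List (List String) :=
  let templateX := (template.headD []).length
  let templateY := template.length
  ((List.range templateY).foldl (doTilingOuter template size templateX)
    (template, ((1 : Int), (1 : Int)), (0 : Int))).1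

-- ===== PORT B =====
-- Source B: tiling = deepcopy(template); nested index loops overwrite each cell with
-- the closed-form label str((x//(size[0]+1)+1, y//(size[1]+1)+1)).
def doTiling_alt (template : List (List String)) (size : Int × Int) : List (List String) :=
  (List.range template.length).foldl (fun nt y =>
    (List.range ((template.headD []).length)).foldl (fun nt (x : Nat) =>
      nt.set y ((nt.getD y []).set x
        (pvStrPair (PySem.Int.floordiv (x : Int) (size.1 + 1) + 1,
                    PySem.Int.floordiv (y : Int) (size.2 + 1) + 1)))) nt) template

-- ===== PRECONDITION & SPEC =====
-- Pre_ excludes the inputs where A raises IndexError — an empty template (template[0])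
-- or a row shorter than the first row — and negative tile-size components, malformed
-- input outside the natural domain, on which A's period-1 rollover labelling is an
-- accident of its implementation (B's closed form would divide by zero at size=-1).
def Pre_doTiling (template : List (List String)) (size : Int × Int) : Prop :=
  template ≠ [] ∧ (∀ row ∈ template, (template.headD []).length ≤ row.length) ∧
  0 ≤ size.1 ∧ 0 ≤ size.2
instance (template : List (List String)) (size : Int × Int) : Decidable (Pre_doTiling template size) := by
  unfold Pre_doTiling; infer_instance

def pvWitness_doTiling : List (List String) × (Int × Int) :=
  ([["w", "a"], ["b", "c"]], (1, 1))

def Spec_doTiling (template : List (List String)) (size : Int × Int) (out : List (List String)) : Prop := out = doTiling_alt template size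
instance (template : List (List String)) (size : Int × Int) (out : List (List String)) : Decidable (Spec_doTiling template size out) := by unfold Spec_doTiling; infer_instance

-- ===== CLAIM (what is proved, stated in full; the proofs are below) =====
def Claim_equal_doTiling : Prop := ∀ (template : List (List String)) (size : Int × Int), Dom_doTiling template size → Pre_doTiling template size → Spec_doTiling template size (doTiling template size)

-- ===== LEMMAS AND PROOFS =====

-- the label and rollover counter of A's accumulator, in closed form (for 0 ≤ s)
def pvL (s a : Int) : Int := a / (s + 1) + 1
def pvC (s a : Int) : Int := a % (s + 1)

lemma pv_div_mod (p q r : Int) (hp : 0 < p) (h0 : 0 ≤ r) (hr : r < p) :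
    (p * q + r) / p = q ∧ (p * q + r) % p = r := by
  constructor
  · have h1 : p * q + r = r + p * q := by ring
    rw [h1, Int.add_mul_ediv_left r q (by omega : p ≠ 0), Int.ediv_eq_zero_of_lt h0 hr]
    ring
  · have h1 : p * q + r = r + p * q := by ring
    rw [h1, Int.add_mul_emod_self_left, Int.emod_eq_of_lt h0 hr]

lemma pv_roll_lt (s a : Int) (hs : 0 ≤ s) (_ha : 0 ≤ a) (h : pvC s a < s) :
    pvL s (a + 1) = pvL s a ∧ pvC s (a + 1) = pvC s a + 1 := by
  unfold pvL pvC at *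
  have hp : 0 < s + 1 := by omega
  have hq : (s + 1) * (a / (s + 1)) + a % (s + 1) = a := Int.mul_ediv_add_emod a (s + 1)
  have h0 : 0 ≤ a % (s + 1) := Int.emod_nonneg a (by omega)
  have h2 : a + 1 = (s + 1) * (a / (s + 1)) + (a % (s + 1) + 1) := by omega
  have h3 := pv_div_mod (s + 1) (a / (s + 1)) (a % (s + 1) + 1) hp (by omega) (by omega)
  rw [h2, h3.1, h3.2]
  exact ⟨rfl, rfl⟩

lemma pv_roll_ge (s a : Int) (hs : 0 ≤ s) (_ha : 0 ≤ a) (h : ¬ pvC s a < s) :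
    pvL s (a + 1) = pvL s a + 1 ∧ pvC s (a + 1) = 0 := by
  unfold pvL pvC at *
  have hp : 0 < s + 1 := by omega
  have hq : (s + 1) * (a / (s + 1)) + a % (s + 1) = a := Int.mul_ediv_add_emod a (s + 1)
  have h0 : 0 ≤ a % (s + 1) := Int.emod_nonneg a (by omega)
  have h1 : a % (s + 1) < s + 1 := Int.emod_lt_of_pos a hp
  have h2 : a + 1 = (s + 1) * (a / (s + 1) + 1) + 0 := by rw [mul_add]; omega
  have h3 := pv_div_mod (s + 1) (a / (s + 1) + 1) 0 hp (by omega) (by omega)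
  rw [h2, h3.1, h3.2]
  exact ⟨rfl, rfl⟩

lemma pvL_zero (s : Int) (_hs : 0 ≤ s) : pvL s 0 = 1 := by
  unfold pvL; rw [Int.zero_ediv]; ring

lemma pvC_zero (s : Int) : pvC s 0 = 0 := by
  unfold pvC; simp

-- the common row i of both results
def pvRow (size : Int × Int) (w : Nat) (i : Nat) (row : List String) : List String :=
  (List.range w).map (fun (x : Nat) => pvStrPair (pvL size.1 (x : Int), pvL size.2 (i : Int))) ++ row.drop w

lemma pv_getD_set {α : Type} (l : List α) (y : Nat) (r : α) (h : y < l.length) (d : α) :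
    (l.set y r).getD y d = r := by
  simp [List.getD_eq_getElem?_getD, List.getElem?_set_self h]

lemma pv_take_set {α : Type} (l : List α) (a : Nat) (v : α) (h : a < l.length) :
    (l.set a v).take (a + 1) = l.take a ++ [v] := by
  rw [List.set_eq_take_cons_drop v h]
  have h1 : (l.take a).length = a := List.length_take_of_le (by omega)
  have h2 : a + 1 = (l.take a).length + 1 := by omega
  rw [h2, List.take_length_add_append]
  simp

-- A's inner-loop invariant
lemma pv_inner (template : List (List String)) (size : Int × Int) (hs : 0 ≤ size.1)
    (y : Nat) (L : Int) :
    ∀ (k a : Nat) (nt : List (List String)), y < nt.length → a + k ≤ (nt.getD y []).length →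
    (List.range' a k).foldl (doTilingInner template size y)
        (nt, (pvL size.1 a, L), pvC size.1 a)
    = (nt.set y ((nt.getD y []).take a
          ++ (List.range' a k).map (fun (x : Nat) => pvStrPair (pvL size.1 (x : Int), L))
          ++ (nt.getD y []).drop (a + k)),
       (pvL size.1 (a + k), L), pvC size.1 (a + k)) := by
  intro k
  induction k with
  | zero =>
    intro a nt hy hlen
    simp only [List.range'_zero, List.foldl_nil, List.map_nil, Nat.add_zero, List.append_nil]
    rw [List.take_append_drop]
    rw [List.getD_eq_getElem nt [] hy, List.set_getElem_self hy]
    norm_num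
  | succ k ih =>
    intro a nt hy hlen
    rw [List.range'_succ, List.foldl_cons]
    have hstep : doTilingInner template size y (nt, (pvL size.1 a, L), pvC size.1 a) a
        = (nt.set y ((nt.getD y []).set a (pvStrPair (pvL size.1 a, L))),
           (pvL size.1 ((a + 1 : Nat) : Int), L), pvC size.1 ((a + 1 : Nat) : Int)) := by
      unfold doTilingInner
      simp only [ite_self]
      push_cast
      by_cases h : pvC size.1 (a : Int) < size.1
      · have hr := pv_roll_lt size.1 a hs (Int.natCast_nonneg a) h
        rw [if_pos h, hr.1, hr.2]
      · have hr := pv_roll_ge size.1 a hs (Int.natCast_nonneg a) h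
        rw [if_neg h, hr.1, hr.2]
    rw [hstep]
    have hy' : y < (nt.set y ((nt.getD y []).set a (pvStrPair (pvL size.1 a, L)))).length := by
      simpa using hy
    have hlen' : a + 1 + k ≤
        ((nt.set y ((nt.getD y []).set a (pvStrPair (pvL size.1 a, L)))).getD y []).length := by
      rw [pv_getD_set _ _ _ hy, List.length_set]
      omega
    rw [ih (a + 1) _ hy' hlen']
    rw [pv_getD_set _ _ _ hy, List.set_set]
    have ha : a < (nt.getD y []).length := by omega
    rw [pv_take_set _ _ _ ha, List.drop_set_of_lt (by omega)]
    simp only [Prod.mk.injEq]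
    refine ⟨?_, ?_, ?_⟩
    · rw [show a + 1 + k = a + (k + 1) from by omega]
      simp [List.append_assoc]
    · have e : ((a + 1 : Nat) : Int) + (k : Int) = (a : Int) + ((k + 1 : Nat) : Int) := by
        push_cast; ring
      rw [e]
      exact ⟨rfl, trivial⟩
    · have e : ((a + 1 : Nat) : Int) + (k : Int) = (a : Int) + ((k + 1 : Nat) : Int) := by
        push_cast; ring
      rw [e]

-- A's outer-loop invariant
lemma pv_outer (template : List (List String)) (size : Int × Int)
    (hs1 : 0 ≤ size.1) (hs2 : 0 ≤ size.2) (w : Nat)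
    (hw : ∀ i, i < template.length → w ≤ (template.getD i []).length) :
    ∀ (k y : Nat) (pref : List (List String)) (lbl1 : Int), pref.length = y →
      y + k ≤ template.length →
    ∃ l1 : Int,
    (List.range' y k).foldl (doTilingOuter template size w)
        (pref ++ template.drop y, (lbl1, pvL size.2 y), pvC size.2 y)
    = (pref ++ (List.range' y k).map (fun (i : Nat) => pvRow size w i (template.getD i []))
          ++ template.drop (y + k),
       (l1, pvL size.2 (y + k)), pvC size.2 (y + k)) := by
  intro k
  induction k with
  | zero =>
    intro y pref lbl1 hpl hyk
    exact ⟨lbl1, by simp⟩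
  | succ k ih =>
    intro y pref lbl1 hpl hyk
    have hyn : y < template.length := by omega
    have hnt_len : y < (pref ++ template.drop y).length := by
      simp only [List.length_append, List.length_drop, hpl]
      omega
    have hgetD : (pref ++ template.drop y).getD y [] = template.getD y [] := by
      rw [← hpl]
      simp [List.getD_eq_getElem?_getD, hpl, hyn]
    have hset : ∀ r : List String,
        (pref ++ template.drop y).set y r = (pref ++ [r]) ++ template.drop (y + 1) := by
      intro r
      obtain ⟨t, hd⟩ : ∃ t, template.drop y = t :: template.drop (y + 1) :=
        ⟨template[y], List.drop_eq_getElem_cons hyn⟩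
      rw [hd, ← hpl]
      simp
    have h0 := pv_inner template size hs1 y (pvL size.2 y) w 0 (pref ++ template.drop y)
      hnt_len (by rw [hgetD]; simpa using hw y hyn)
    rw [List.range'_succ, List.foldl_cons]
    have hstep : doTilingOuter template size w
        (pref ++ template.drop y, (lbl1, pvL size.2 y), pvC size.2 y) y
        = ((pref ++ [pvRow size w y (template.getD y [])]) ++ template.drop (y + 1),
           (pvL size.1 (w : Int), pvL size.2 ((y + 1 : Nat) : Int)),
           pvC size.2 ((y + 1 : Nat) : Int)) := by
      unfold doTilingOuter
      simp only [List.range_eq_range']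
      have hz : ((pref ++ template.drop y, ((1 : Int), pvL size.2 (y : Int)), (0 : Int)) :
          List (List String) × (Int × Int) × Int)
          = (pref ++ template.drop y,
             (pvL size.1 ((0 : Nat) : Int), pvL size.2 (y : Int)), pvC size.1 ((0 : Nat) : Int)) := by
        simp [pvL_zero size.1 hs1, pvC_zero]
      rw [hz, h0]
      simp only [hgetD, List.take_zero, List.nil_append, Nat.zero_add, Nat.cast_zero]
      rw [hset]
      have hrow : (List.range' 0 w).map (fun (x : Nat) => pvStrPair (pvL size.1 (x : Int), pvL size.2 (y : Int)))
          ++ (template.getD y []).drop w = pvRow size w y (template.getD y []) := by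
        unfold pvRow
        rw [List.range_eq_range']
      rw [hrow]
      push_cast
      by_cases h : pvC size.2 (y : Int) < size.2
      · have hr := pv_roll_lt size.2 y hs2 (Int.natCast_nonneg y) h
        rw [if_pos h, hr.1, hr.2]
        norm_num
      · have hr := pv_roll_ge size.2 y hs2 (Int.natCast_nonneg y) h
        rw [if_neg h, hr.1, hr.2]
        norm_num
    rw [hstep]
    obtain ⟨l1, hrec⟩ := ih (y + 1) (pref ++ [pvRow size w y (template.getD y [])])
      (pvL size.1 (w : Int)) (by simp [hpl]) (by omega)
    refine ⟨l1, ?_⟩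
    rw [hrec]
    have e : ((y + 1 : Nat) : Int) + (k : Int) = (y : Int) + ((k + 1 : Nat) : Int) := by
      push_cast; ring
    rw [e, show y + 1 + k = y + (k + 1) from by omega]
    simp [List.append_assoc]

-- B's inner-loop invariant (generic in the cell formula)
lemma pv_innerB (y : Nat) (f : Nat → String) :
    ∀ (k a : Nat) (nt : List (List String)), y < nt.length → a + k ≤ (nt.getD y []).length →
    (List.range' a k).foldl (fun nt (x : Nat) => nt.set y ((nt.getD y []).set x (f x))) nt
    = nt.set y ((nt.getD y []).take a ++ (List.range' a k).map f ++ (nt.getD y []).drop (a + k)) := by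
  intro k
  induction k with
  | zero =>
    intro a nt hy hlen
    simp only [List.range'_zero, List.foldl_nil, List.map_nil, Nat.add_zero, List.append_nil]
    rw [List.take_append_drop]
    rw [List.getD_eq_getElem nt [] hy, List.set_getElem_self hy]
  | succ k ih =>
    intro a nt hy hlen
    rw [List.range'_succ, List.foldl_cons]
    have hy' : y < (nt.set y ((nt.getD y []).set a (f a))).length := by simpa using hy
    have hlen' : a + 1 + k ≤ ((nt.set y ((nt.getD y []).set a (f a))).getD y []).length := by
      rw [pv_getD_set _ _ _ hy, List.length_set]
      omega
    rw [ih (a + 1) _ hy' hlen']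
    rw [pv_getD_set _ _ _ hy, List.set_set]
    have ha : a < (nt.getD y []).length := by omega
    rw [pv_take_set _ _ _ ha, List.drop_set_of_lt (by omega)]
    rw [show a + 1 + k = a + (k + 1) from by omega]
    simp [List.append_assoc]

-- B's outer-loop invariant
lemma pv_outerB (template : List (List String)) (size : Int × Int)
    (hs1 : 0 ≤ size.1) (hs2 : 0 ≤ size.2) (w : Nat)
    (hw : ∀ i, i < template.length → w ≤ (template.getD i []).length) :
    ∀ (k y : Nat) (pref : List (List String)), pref.length = y → y + k ≤ template.length →
    (List.range' y k).foldl (fun nt y =>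
        (List.range w).foldl (fun nt (x : Nat) =>
          nt.set y ((nt.getD y []).set x
            (pvStrPair (PySem.Int.floordiv (x : Int) (size.1 + 1) + 1,
                        PySem.Int.floordiv (y : Int) (size.2 + 1) + 1)))) nt)
        (pref ++ template.drop y)
    = pref ++ (List.range' y k).map (fun (i : Nat) => pvRow size w i (template.getD i []))
        ++ template.drop (y + k) := by
  intro k
  induction k with
  | zero =>
    intro y pref hpl hyk
    simp
  | succ k ih =>
    intro y pref hpl hyk
    have hyn : y < template.length := by omega
    have hnt_len : y < (pref ++ template.drop y).length := by
      simp only [List.length_append, List.length_drop, hpl]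
      omega
    have hgetD : (pref ++ template.drop y).getD y [] = template.getD y [] := by
      rw [← hpl]
      simp [List.getD_eq_getElem?_getD, hpl, hyn]
    have hset : ∀ r : List String,
        (pref ++ template.drop y).set y r = (pref ++ [r]) ++ template.drop (y + 1) := by
      intro r
      obtain ⟨t, hd⟩ : ∃ t, template.drop y = t :: template.drop (y + 1) :=
        ⟨template[y], List.drop_eq_getElem_cons hyn⟩
      rw [hd, ← hpl]
      simp
    rw [List.range'_succ, List.foldl_cons]
    have hstep : (List.range w).foldl (fun nt (x : Nat) =>
          nt.set y ((nt.getD y []).set x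
            (pvStrPair (PySem.Int.floordiv (x : Int) (size.1 + 1) + 1,
                        PySem.Int.floordiv (y : Int) (size.2 + 1) + 1))))
          (pref ++ template.drop y)
        = (pref ++ [pvRow size w y (template.getD y [])]) ++ template.drop (y + 1) := by
      rw [List.range_eq_range']
      rw [pv_innerB y _ w 0 (pref ++ template.drop y) hnt_len
        (by rw [hgetD]; simpa using hw y hyn)]
      simp only [hgetD, List.take_zero, List.nil_append, Nat.zero_add]
      rw [hset]
      congr 2
      unfold pvRow
      rw [List.range_eq_range']
      congr 1
      congr 1
      apply List.map_congr_left
      intro x _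
      rw [PySem.Int.floordiv_eq_ediv_of_pos (by omega : (0 : Int) < size.1 + 1),
          PySem.Int.floordiv_eq_ediv_of_pos (by omega : (0 : Int) < size.2 + 1)]
      rfl
    rw [hstep]
    rw [ih (y + 1) (pref ++ [pvRow size w y (template.getD y [])]) (by simp [hpl]) (by omega)]
    rw [show y + 1 + k = y + (k + 1) from by omega]
    simp [List.append_assoc]

-- ===== VERDICT (by name: the statement is the Claim_ definition above) =====
theorem doTiling_spec : Claim_equal_doTiling := by
  intro template size _ hpre
  unfold Spec_doTiling
  obtain ⟨hne, hrows, hs1, hs2⟩ := hpre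
  have hw : ∀ i, i < template.length → (template.headD []).length ≤ (template.getD i []).length := by
    intro i hi
    rw [List.getD_eq_getElem template [] hi]
    exact hrows template[i] (List.getElem_mem hi)
  obtain ⟨l1, hA⟩ := pv_outer template size hs1 hs2 ((template.headD []).length) hw
    template.length 0 [] 1 rfl (by omega)
  have hB := pv_outerB template size hs1 hs2 ((template.headD []).length) hw
    template.length 0 [] rfl (by omega)
  simp only [List.nil_append, List.drop_zero] at hA hB
  unfold doTiling doTiling_alt
  show (List.foldl (doTilingOuter template size ((template.headD []).length))
      (template, ((1 : Int), (1 : Int)), (0 : Int)) (List.range template.length)).1 = _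
  rw [List.range_eq_range']
  have hinit : ((template, ((1 : Int), (1 : Int)), (0 : Int)) :
      List (List String) × (Int × Int) × Int)
      = (template, ((1 : Int), pvL size.2 ((0 : Nat) : Int)), pvC size.2 ((0 : Nat) : Int)) := by
    simp [pvL_zero size.2 hs2, pvC_zero]
  rw [hinit, hA, hB]
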